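-- pv_equiv track=rewrite | github.com/analysis-bots/ExternalExplainers | src/external_explainers/metainsight_explainer/patterns.py | labels_to_grouped_labels
-- ===== SOURCE A (Python) =====
-- from collections import defaultdict
-- from typing import Literal, List
--
-- def labels_to_grouped_labels(labels: List[str], pattern_labels: List[int]) -> defaultdict:
--     """
--     Collect the labels for each group, such that each group of patterns has an array
--     containing all of the labels for the patterns in that group.
--     :param labels: The string labels for each pattern
--     :param pattern_labels: The integer group labels for each pattern
--     :return: A defaultdict mapping group labels to a string saying Mean ({labels}) for each group
--     """
--     grouped_labels = defaultdict(list)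
--     for i, val in enumerate(pattern_labels):
--         grouped_labels[val].append(labels[i])
--     output_labels = defaultdict(str)
--     for key in grouped_labels.keys():
--         output_labels[key] = f"Mean ({', '.join(grouped_labels[key])})" if len(grouped_labels[key]) > 1 else \
--         grouped_labels[key][0]
--     return output_labels
-- ===== SOURCE B (Python) =====
-- from collections import defaultdict
--
--
-- def labels_to_grouped_labels(labels, pattern_labels):
--     # One pass: build each group's joined label string incrementally (plus a
--     # per-group count), instead of collecting per-group lists and joining later.
--     joined = {}
--     counts = {}
--     for g, lab in zip(pattern_labels, labels):
--         if g in joined: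
--             joined[g] = joined[g] + ", " + lab
--             counts[g] = counts[g] + 1
--         else:
--             joined[g] = lab
--             counts[g] = 1
--     output_labels = defaultdict(str)
--     for g, s in joined.items():
--         output_labels[g] = f"Mean ({s})" if counts[g] > 1 else s
--     return output_labels
-- ===== Notes on version B (the rewrite author's own statement) =====
-- stated objective: alternative
-- what changed: B makes a single pass over zip(pattern_labels, labels) that builds each group's joined label string and count incrementally, instead of A's two-phase grouping into per-group lists followed by a join pass.
import Mathlib
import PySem

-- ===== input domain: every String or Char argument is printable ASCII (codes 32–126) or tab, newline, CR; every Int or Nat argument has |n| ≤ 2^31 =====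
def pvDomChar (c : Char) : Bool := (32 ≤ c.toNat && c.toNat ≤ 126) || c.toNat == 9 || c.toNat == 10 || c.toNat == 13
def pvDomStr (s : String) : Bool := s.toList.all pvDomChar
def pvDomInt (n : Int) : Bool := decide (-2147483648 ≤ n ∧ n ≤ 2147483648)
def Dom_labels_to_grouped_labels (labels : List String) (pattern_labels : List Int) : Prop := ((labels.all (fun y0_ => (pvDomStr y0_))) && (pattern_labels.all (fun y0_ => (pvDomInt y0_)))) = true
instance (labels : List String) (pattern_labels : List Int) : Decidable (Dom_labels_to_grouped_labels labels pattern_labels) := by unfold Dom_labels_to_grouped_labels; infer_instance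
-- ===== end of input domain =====

-- B replaces A's two-phase grouping (per-group lists, then a join pass) with a single
-- pass over zip(pattern_labels, labels) that builds each group's joined string and
-- count incrementally; objective: alternative (same cost, different algorithm).


-- ===== PORT A =====
def labels_to_grouped_labels (labels : List String) (pattern_labels : List Int) : List (Int × String) :=
  -- grouped_labels = defaultdict(list); for i, val in enumerate(pattern_labels): grouped_labels[val].append(labels[i])
  let grouped : PySem.Dict Int (List String) :=
    (PySem.List.enumerate pattern_labels 0).foldl
      (fun d p => d.modify p.2 [] (fun l => l ++ [PySem.List.pyGetD labels p.1 ""]))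
      PySem.Dict.empty
  -- output_labels = defaultdict(str); for key in grouped_labels.keys(): …
  let output : PySem.Dict Int String :=
    grouped.keys.foldl
      (fun out key =>
        out.insert key
          (if 1 < (grouped.getD key []).length then
             "Mean (" ++ PySem.Str.join ", " (grouped.getD key []) ++ ")"
           else PySem.List.pyGetD (grouped.getD key []) 0 ""))
      PySem.Dict.empty
  output.items

-- ===== PORT B =====
def labels_to_grouped_labels_alt (labels : List String) (pattern_labels : List Int) : List (Int × String) :=
  -- single pass over zip(pattern_labels, labels): joined string + count per group
  let st : PySem.Dict Int String × PySem.Dict Int Int :=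
    (pattern_labels.zip labels).foldl
      (fun st p =>
        if st.1.contains p.1 then
          (st.1.insert p.1 (st.1.getD p.1 "" ++ ", " ++ p.2),
           st.2.insert p.1 (st.2.getD p.1 0 + 1))
        else
          (st.1.insert p.1 p.2, st.2.insert p.1 1))
      (PySem.Dict.empty, PySem.Dict.empty)
  -- output_labels = defaultdict(str); for g, s in joined.items(): …
  (st.1.items.foldl
     (fun (out : PySem.Dict Int String) q =>
        out.insert q.1 (if 1 < st.2.getD q.1 0 then "Mean (" ++ q.2 ++ ")" else q.2))
     PySem.Dict.empty).items

-- ===== PRECONDITION & SPEC =====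
-- Pre_ excludes exactly the inputs where A raises IndexError (labels shorter than pattern_labels).
def Pre_labels_to_grouped_labels (labels : List String) (pattern_labels : List Int) : Prop :=
  pattern_labels.length ≤ labels.length
instance (labels : List String) (pattern_labels : List Int) : Decidable (Pre_labels_to_grouped_labels labels pattern_labels) := by unfold Pre_labels_to_grouped_labels; infer_instance
def pvWitness_labels_to_grouped_labels : List String × List Int := (["a", "b", "c"], [1, 2, 1])

def Spec_labels_to_grouped_labels (labels : List String) (pattern_labels : List Int) (out : List (Int × String)) : Prop := out = labels_to_grouped_labels_alt labels pattern_labels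
instance (labels : List String) (pattern_labels : List Int) (out : List (Int × String)) : Decidable (Spec_labels_to_grouped_labels labels pattern_labels out) := by unfold Spec_labels_to_grouped_labels; infer_instance

-- ===== CLAIM (what is proved, stated in full; the proofs are below) =====
def Claim_equal_labels_to_grouped_labels : Prop := ∀ (labels : List String) (pattern_labels : List Int), Dom_labels_to_grouped_labels labels pattern_labels → Pre_labels_to_grouped_labels labels pattern_labels → Spec_labels_to_grouped_labels labels pattern_labels (labels_to_grouped_labels labels pattern_labels)


-- ===== LEMMAS AND PROOFS =====

-- B's incremental join, as a function of a group's label list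
def sjoin : List String → String
  | [] => ""
  | x :: xs => xs.foldl (fun s lab => s ++ ", " ++ lab) x

-- the joined-string / count dictionaries determined by A's grouping dictionary
def mapJ (g : PySem.Dict Int (List String)) : PySem.Dict Int String :=
  PySem.Dict.mk (g.items.map (fun p => (p.1, sjoin p.2)))
def mapC (g : PySem.Dict Int (List String)) : PySem.Dict Int Int :=
  PySem.Dict.mk (g.items.map (fun p => (p.1, (p.2.length : Int))))

-- A's phase-1 step (over (group, label) pairs) and B's phase-1 step
def astep (d : PySem.Dict Int (List String)) (p : Int × String) : PySem.Dict Int (List String) :=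
  d.insert p.1 (d.getD p.1 [] ++ [p.2])
def bstep (st : PySem.Dict Int String × PySem.Dict Int Int) (p : Int × String) :
    PySem.Dict Int String × PySem.Dict Int Int :=
  if st.1.contains p.1 then
    (st.1.insert p.1 (st.1.getD p.1 "" ++ ", " ++ p.2),
     st.2.insert p.1 (st.2.getD p.1 0 + 1))
  else
    (st.1.insert p.1 p.2, st.2.insert p.1 1)

-- phase-2 value functions (A's and B's)
def fA (g : PySem.Dict Int (List String)) (key : Int) : String :=
  if 1 < (g.getD key []).length then
    "Mean (" ++ PySem.Str.join ", " (g.getD key []) ++ ")"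
  else PySem.List.pyGetD (g.getD key []) 0 ""
def fB (c : PySem.Dict Int Int) (q : Int × String) : String :=
  if 1 < c.getD q.1 0 then "Mean (" ++ q.2 ++ ")" else q.2

theorem foldl_pref (t : List String) (a b : String) :
    t.foldl (fun s lab => s ++ ", " ++ lab) (a ++ b)
      = a ++ t.foldl (fun s lab => s ++ ", " ++ lab) b := by
  induction t generalizing b with
  | nil => rfl
  | cons y t ih =>
      rw [List.foldl_cons, List.foldl_cons,
        show a ++ b ++ ", " ++ y = a ++ (b ++ ", " ++ y) by
          simp [String.append_assoc]]
      exact ih (b ++ ", " ++ y)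

theorem sjoin_cons_cons (x y : String) (t : List String) :
    sjoin (x :: y :: t) = x ++ ", " ++ sjoin (y :: t) := by
  show t.foldl (fun s lab => s ++ ", " ++ lab) (x ++ ", " ++ y) = x ++ ", " ++ sjoin (y :: t)
  rw [foldl_pref t (x ++ ", ") y]
  rfl

theorem sjoin_snoc (v : List String) (hv : v ≠ []) (lab : String) :
    sjoin (v ++ [lab]) = sjoin v ++ ", " ++ lab := by
  cases v with
  | nil => exact absurd rfl hv
  | cons x xs => simp [sjoin, List.foldl_append]

theorem str_cons2_append (cs : List Char) :
    String.ofList (',' :: ' ' :: cs) = ", " ++ String.ofList cs := by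
  show String.ofList ([',', ' '] ++ cs) = ", " ++ String.ofList cs
  rw [String.ofList_append, show String.ofList [',', ' '] = ", " by decide]

theorem sjoin_eq_join_cons (t : List String) :
    ∀ x, sjoin (x :: t) = PySem.Str.join ", " (x :: t) := by
  induction t with
  | nil => intro x; simp [sjoin, PySem.Str.join, PySem.Chars.join_singleton]
  | cons y t ih =>
      intro x
      rw [sjoin_cons_cons, ih y]
      simp [PySem.Str.join, PySem.Chars.join_cons_cons, str_cons2_append, String.append_assoc]

theorem sjoin_eq_join (v : List String) (hv : v ≠ []) :
    sjoin v = PySem.Str.join ", " v := by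
  cases v with
  | nil => exact absurd rfl hv
  | cons x xs => exact sjoin_eq_join_cons xs x

-- dictionary lemmas specific to the mapped-dictionary shapes used here
theorem get?_mapped {ν μ : Type} (f : ν → μ) (l : List (Int × ν)) (k : Int) :
    (PySem.Dict.mk (l.map (fun p => (p.1, f p.2)))).get? k
      = ((PySem.Dict.mk l).get? k).map f := by
  simp only [PySem.Dict.get?, List.find?_map, Option.map_map]
  rfl

theorem contains_insert' {ν : Type} (d : PySem.Dict Int ν) (k : Int) (v : ν) (k' : Int) :
    (d.insert k v).contains k' = (d.contains k' || (k == k')) := by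
  by_cases h : d.contains k = true
  · have hstep : (d.insert k v).contains k' = d.contains k' := by
      have hitems : (d.insert k v).items
          = d.items.map (fun p => if (p.1 == k) = true then (k, v) else p) := by
        simp [PySem.Dict.insert, h]
      show ((d.insert k v).items.any fun p => p.1 == k') = (d.items.any fun p => p.1 == k')
      rw [hitems, List.any_map]
      refine PySem.List.any_congr_mem ?_
      intro p hp
      by_cases hpk : (p.1 == k) = true
      · simp only [Function.comp_apply, hpk, if_true]
        rw [eq_of_beq hpk]
      · simp [Function.comp, hpk]
    rw [hstep]
    by_cases hkk : (k == k') = true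
    · have hck' : d.contains k' = true := by rw [← eq_of_beq hkk]; exact h
      simp [hck', hkk]
    · have hkk' : (k == k') = false := by simpa using hkk
      simp [hkk']
  · have h' : d.contains k = false := by simpa using h
    have hitems : (d.insert k v).items = d.items ++ [(k, v)] := by
      simp [PySem.Dict.insert, h']
    show ((d.insert k v).items.any fun p => p.1 == k') = _
    rw [hitems, List.any_append]
    simp [PySem.Dict.contains]

theorem keys_insert_of_contains {ν : Type} (d : PySem.Dict Int ν) (k : Int) (v : ν)
    (h : d.contains k = true) : (d.insert k v).keys = d.keys := by
  have hitems : (d.insert k v).items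
      = d.items.map (fun p => if (p.1 == k) = true then (k, v) else p) := by
    simp [PySem.Dict.insert, h]
  simp only [PySem.Dict.keys, hitems, List.map_map]
  refine List.map_congr_left ?_
  intro p hp
  by_cases hpk : (p.1 == k) = true
  · simp only [Function.comp_apply, hpk, if_true]
    rw [eq_of_beq hpk]
  · simp [Function.comp, hpk]

theorem keys_insert_of_not {ν : Type} (d : PySem.Dict Int ν) (k : Int) (v : ν)
    (h : d.contains k = false) : (d.insert k v).keys = d.keys ++ [k] := by
  simp [PySem.Dict.insert, h, PySem.Dict.keys]

theorem not_mem_keys_of_contains_false {ν : Type} (d : PySem.Dict Int ν) (k : Int)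
    (h : d.contains k = false) : k ∉ d.keys := by
  intro hk
  simp only [PySem.Dict.keys, List.mem_map] at hk
  obtain ⟨p, hp, hpk⟩ := hk
  simp only [PySem.Dict.contains, List.any_eq_false] at h
  exact h p hp (by simp [hpk])

theorem get?_eq_none_of_contains_false {ν : Type} (d : PySem.Dict Int ν) (k : Int)
    (h : d.contains k = false) : d.get? k = none := by
  simp only [PySem.Dict.contains, List.any_eq_false] at h
  simp [PySem.Dict.get?, List.find?_eq_none.mpr h]

theorem exists_get?_of_contains {ν : Type} (d : PySem.Dict Int ν) (k : Int)
    (h : d.contains k = true) : ∃ p ∈ d.items, p.1 = k ∧ d.get? k = some p.2 := by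
  simp only [PySem.Dict.contains, List.any_eq_true] at h
  obtain ⟨p, hp, hpk⟩ := h
  have hf : (List.find? (fun p : Int × ν => p.1 == k) d.items).isSome := by
    rw [List.find?_isSome]; exact ⟨p, hp, hpk⟩
  obtain ⟨q, hq⟩ := Option.isSome_iff_exists.mp hf
  have hqk := List.find?_some hq
  have hqk' : (q.1 == k) = true := hqk
  refine ⟨q, List.mem_of_find?_eq_some hq, eq_of_beq hqk', ?_⟩
  simp [PySem.Dict.get?, hq]

theorem nodup_keys_insert {ν : Type} (d : PySem.Dict Int ν) (k : Int) (v : ν)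
    (h : d.keys.Nodup) : (d.insert k v).keys.Nodup := by
  by_cases hc : d.contains k = true
  · rw [keys_insert_of_contains d k v hc]; exact h
  · have hk : k ∉ d.keys := not_mem_keys_of_contains_false d k (by simpa using hc)
    rw [keys_insert_of_not d k v (by simpa using hc)]
    refine List.nodup_append.mpr ⟨h, List.nodup_singleton k, ?_⟩
    intro a ha b hb
    have hbk : b = k := by simpa using hb
    subst hbk
    intro heq
    exact hk (heq ▸ ha)

theorem nodup_keys_foldl_astep (pairs : List (Int × String)) :
    ∀ g : PySem.Dict Int (List String), g.keys.Nodup → (pairs.foldl astep g).keys.Nodup := by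
  induction pairs with
  | nil => intro g hg; exact hg
  | cons p t ih => intro g hg; exact ih _ (nodup_keys_insert _ _ _ hg)

theorem get?_of_mem_of_nodup {ν : Type} (l : List (Int × ν))
    (hnd : (l.map (fun x => x.1)).Nodup) :
    ∀ p ∈ l, (PySem.Dict.mk l).get? p.1 = some p.2 := by
  induction l with
  | nil => intro p hp; cases hp
  | cons q t ih =>
      intro p hp
      rcases List.mem_cons.mp hp with hp | hp
      · subst hp
        have hfind : List.find? (fun r : Int × ν => r.1 == p.1) (p :: t) = some p :=
          List.find?_cons_of_pos (by simp)
        simp [PySem.Dict.get?, hfind]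
      · have hq : (q.1 == p.1) = false := by
          rcases hb : (q.1 == p.1) with _ | _
          · rfl
          · exfalso
            have hmem : p.1 ∈ t.map (fun x => x.1) := List.mem_map_of_mem hp
            rw [← eq_of_beq hb] at hmem
            exact (List.nodup_cons.mp hnd).1 hmem
        have hfind : List.find? (fun r : Int × ν => r.1 == p.1) (q :: t)
            = List.find? (fun r : Int × ν => r.1 == p.1) t :=
          List.find?_cons_of_neg (by simp [hq])
        have hrec := ih (List.nodup_cons.mp hnd).2 p hp
        simpa [PySem.Dict.get?, hfind] using hrec

-- values stay nonempty through A's phase 1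
theorem astep_ne (g : PySem.Dict Int (List String))
    (hne : ∀ p ∈ g.items, p.2 ≠ []) (pr : Int × String) :
    ∀ p ∈ (astep g pr).items, p.2 ≠ [] := by
  intro p hp
  by_cases hc : g.contains pr.1 = true
  · have hitems : (astep g pr).items
        = g.items.map (fun r => if (r.1 == pr.1) = true then (pr.1, g.getD pr.1 [] ++ [pr.2]) else r) := by
      simp [astep, PySem.Dict.insert, hc]
    rw [hitems] at hp
    rcases List.mem_map.mp hp with ⟨q, hq, hpq⟩
    by_cases hqk : (q.1 == pr.1) = true
    · rw [← hpq]; simp [hqk]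
    · rw [← hpq]; simpa [hqk] using hne q hq
  · have h' : g.contains pr.1 = false := by simpa using hc
    have hitems : (astep g pr).items = g.items ++ [(pr.1, g.getD pr.1 [] ++ [pr.2])] := by
      simp [astep, PySem.Dict.insert, h']
    rw [hitems] at hp
    rcases List.mem_append.mp hp with hp | hp
    · exact hne p hp
    · have hp' := List.mem_singleton.mp hp
      rw [hp']; simp

theorem step_comm (g : PySem.Dict Int (List String))
    (hne : ∀ p ∈ g.items, p.2 ≠ []) (pr : Int × String) :
    bstep (mapJ g, mapC g) pr = (mapJ (astep g pr), mapC (astep g pr)) := by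
  obtain ⟨k, lab⟩ := pr
  have hEta : PySem.Dict.mk g.items = g := rfl
  have hJany : ((mapJ g).items.any fun p => p.1 == k) = (g.items.any fun p => p.1 == k) := by
    rw [show (mapJ g).items = g.items.map (fun p => (p.1, sjoin p.2)) from rfl, List.any_map]
    rfl
  have hCany : ((mapC g).items.any fun p => p.1 == k) = (g.items.any fun p => p.1 == k) := by
    rw [show (mapC g).items = g.items.map (fun p => (p.1, (p.2.length : Int))) from rfl,
      List.any_map]
    rfl
  by_cases hc : g.contains k = true
  · obtain ⟨q, hq, hqk, hget⟩ := exists_get?_of_contains g k hc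
    have hvne : q.2 ≠ [] := hne q hq
    have hgd : g.getD k [] = q.2 := by simp [PySem.Dict.getD, hget]
    have hcJ : (mapJ g).contains k = true := by
      show ((mapJ g).items.any fun p => p.1 == k) = true
      rw [hJany]; exact hc
    have hcC : (mapC g).contains k = true := by
      show ((mapC g).items.any fun p => p.1 == k) = true
      rw [hCany]; exact hc
    have hgdJ : (mapJ g).getD k "" = sjoin q.2 := by
      have hm := get?_mapped (f := sjoin) g.items k
      simp [PySem.Dict.getD, mapJ, hm, hEta, hget]
    have hgdC : (mapC g).getD k 0 = (q.2.length : Int) := by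
      have hm := get?_mapped (f := fun v : List String => (v.length : Int)) g.items k
      simp [PySem.Dict.getD, mapC, hm, hEta, hget]
    have hins : astep g (k, lab)
        = PySem.Dict.mk (g.items.map (fun r => if (r.1 == k) = true then (k, q.2 ++ [lab]) else r)) := by
      simp [astep, PySem.Dict.insert, hc, hgd]
    simp only [bstep, hcJ, if_true, hgdJ, hgdC, hins, Prod.mk.injEq]
    constructor
    · -- joined side
      apply PySem.Dict.ext
      have hBitems : ((mapJ g).insert k (sjoin q.2 ++ ", " ++ lab)).items
          = (mapJ g).items.map
              (fun r => if (r.1 == k) = true then (k, sjoin q.2 ++ ", " ++ lab) else r) := by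
        simp [PySem.Dict.insert, hcJ]
      rw [hBitems,
        show (mapJ g).items = g.items.map (fun p => (p.1, sjoin p.2)) from rfl,
        show (mapJ (PySem.Dict.mk (g.items.map
            (fun r => if (r.1 == k) = true then (k, q.2 ++ [lab]) else r)))).items
          = (g.items.map (fun r => if (r.1 == k) = true then (k, q.2 ++ [lab]) else r)).map
              (fun p => (p.1, sjoin p.2)) from rfl,
        List.map_map, List.map_map]
      refine List.map_congr_left ?_
      intro p hp
      by_cases hpk : (p.1 == k) = true
      · simp [Function.comp, hpk, sjoin_snoc q.2 hvne lab]
      · simp [Function.comp, hpk]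
    · -- counts side
      apply PySem.Dict.ext
      have hBitems : ((mapC g).insert k ((q.2.length : Int) + 1)).items
          = (mapC g).items.map
              (fun r => if (r.1 == k) = true then (k, (q.2.length : Int) + 1) else r) := by
        simp [PySem.Dict.insert, hcC]
      rw [hBitems,
        show (mapC g).items = g.items.map (fun p => (p.1, (p.2.length : Int))) from rfl,
        show (mapC (PySem.Dict.mk (g.items.map
            (fun r => if (r.1 == k) = true then (k, q.2 ++ [lab]) else r)))).items
          = (g.items.map (fun r => if (r.1 == k) = true then (k, q.2 ++ [lab]) else r)).map
              (fun p => (p.1, (p.2.length : Int))) from rfl,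
        List.map_map, List.map_map]
      refine List.map_congr_left ?_
      intro p hp
      by_cases hpk : (p.1 == k) = true
      · simp [Function.comp, hpk]
      · simp [Function.comp, hpk]
  · have hc' : g.contains k = false := by simpa using hc
    have hgd : g.getD k [] = [] := by
      simp [PySem.Dict.getD, get?_eq_none_of_contains_false g k hc']
    have hcJ : (mapJ g).contains k = false := by
      show ((mapJ g).items.any fun p => p.1 == k) = false
      rw [hJany]; exact hc'
    have hcC : (mapC g).contains k = false := by
      show ((mapC g).items.any fun p => p.1 == k) = false
      rw [hCany]; exact hc'
    have hins : astep g (k, lab) = PySem.Dict.mk (g.items ++ [(k, [lab])]) := by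
      simp [astep, PySem.Dict.insert, hc', hgd]
    simp only [bstep, hcJ, Bool.false_eq_true, if_false, hins, Prod.mk.injEq]
    constructor
    · apply PySem.Dict.ext
      have hBitems : ((mapJ g).insert k lab).items = (mapJ g).items ++ [(k, lab)] := by
        simp [PySem.Dict.insert, hcJ]
      rw [hBitems,
        show (mapJ (PySem.Dict.mk (g.items ++ [(k, [lab])]))).items
          = (g.items ++ [(k, [lab])]).map (fun p => (p.1, sjoin p.2)) from rfl,
        List.map_append,
        show (mapJ g).items = g.items.map (fun p => (p.1, sjoin p.2)) from rfl]
      rfl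
    · apply PySem.Dict.ext
      have hBitems : ((mapC g).insert k 1).items = (mapC g).items ++ [(k, 1)] := by
        simp [PySem.Dict.insert, hcC]
      rw [hBitems,
        show (mapC (PySem.Dict.mk (g.items ++ [(k, [lab])]))).items
          = (g.items ++ [(k, [lab])]).map (fun p => (p.1, (p.2.length : Int))) from rfl,
        List.map_append,
        show (mapC g).items = g.items.map (fun p => (p.1, (p.2.length : Int))) from rfl]
      rfl

theorem phase1 (pairs : List (Int × String)) :
    ∀ g : PySem.Dict Int (List String), (∀ p ∈ g.items, p.2 ≠ []) →
      pairs.foldl bstep (mapJ g, mapC g)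
        = (mapJ (pairs.foldl astep g), mapC (pairs.foldl astep g))
      ∧ (∀ p ∈ (pairs.foldl astep g).items, p.2 ≠ []) := by
  induction pairs with
  | nil => intro g hg; exact ⟨rfl, hg⟩
  | cons p t ih =>
      intro g hg
      simp only [List.foldl_cons]
      rw [step_comm g hg p]
      exact ih _ (astep_ne g hg p)

-- inserting a run of fresh, distinct keys just appends the pairs
theorem foldl_insert_fresh {μ α : Type} (keyf : α → Int) (valf : α → μ) :
    ∀ (l : List α) (out : PySem.Dict Int μ),
      (l.map keyf).Nodup → (∀ a ∈ l, out.contains (keyf a) = false) →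
      (l.foldl (fun o a => o.insert (keyf a) (valf a)) out).items
        = out.items ++ l.map (fun a => (keyf a, valf a)) := by
  intro l
  induction l with
  | nil => intro out _ _; simp
  | cons a t ih =>
      intro out hnd hfresh
      have hca : out.contains (keyf a) = false := hfresh a List.mem_cons_self
      have hins : (out.insert (keyf a) (valf a)).items = out.items ++ [(keyf a, valf a)] := by
        simp [PySem.Dict.insert, hca]
      have hfresh' : ∀ b ∈ t, (out.insert (keyf a) (valf a)).contains (keyf b) = false := by
        intro b hb
        rw [contains_insert']
        have h1 : out.contains (keyf b) = false := hfresh b (List.mem_cons_of_mem a hb)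
        have h2 : (keyf a == keyf b) = false := by
          rcases hab : (keyf a == keyf b) with _ | _
          · rfl
          · exact absurd ((eq_of_beq hab) ▸ List.mem_map_of_mem hb)
              (List.nodup_cons.mp hnd).1
        simp [h1, h2]
      simp only [List.foldl_cons, List.map_cons]
      rw [ih _ (List.nodup_cons.mp hnd).2 hfresh', hins]
      simp

theorem empty_contains_false {μ : Type} (k : Int) :
    (PySem.Dict.empty : PySem.Dict Int μ).contains k = false := rfl

-- phase 2: both output builds produce the same items list
theorem phase2 (G : PySem.Dict Int (List String))
    (hnd : G.keys.Nodup) (hne : ∀ p ∈ G.items, p.2 ≠ []) :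
    (G.keys.foldl (fun out key => out.insert key (fA G key)) PySem.Dict.empty).items
      = ((mapJ G).items.foldl (fun out q => out.insert q.1 (fB (mapC G) q))
          PySem.Dict.empty).items := by
  have hEta : PySem.Dict.mk G.items = G := rfl
  have hndi : (G.items.map (fun x => x.1)).Nodup := hnd
  have hA : (G.keys.foldl (fun out key => out.insert key (fA G key)) PySem.Dict.empty).items
      = G.keys.map (fun k => (k, fA G k)) := by
    have h := foldl_insert_fresh (keyf := fun k : Int => k) (valf := fun k => fA G k)
      G.keys PySem.Dict.empty (by simpa using hnd) (fun a _ => empty_contains_false _)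
    simpa using h
  have hndJ : ((mapJ G).items.map (fun q => q.1)).Nodup := by
    rw [show (mapJ G).items = G.items.map (fun p => (p.1, sjoin p.2)) from rfl, List.map_map]
    exact hndi
  have hB : ((mapJ G).items.foldl (fun out q => out.insert q.1 (fB (mapC G) q))
        PySem.Dict.empty).items
      = (mapJ G).items.map (fun q => (q.1, fB (mapC G) q)) := by
    have h := foldl_insert_fresh (keyf := fun q : Int × String => q.1)
      (valf := fun q => fB (mapC G) q)
      (mapJ G).items PySem.Dict.empty hndJ (fun a _ => empty_contains_false _)
    simpa using h
  rw [hA, hB]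
  have hkeys : G.keys.map (fun k => (k, fA G k)) = G.items.map (fun p => (p.1, fA G p.1)) := by
    simp [PySem.Dict.keys, List.map_map, Function.comp]
  rw [hkeys,
    show (mapJ G).items = G.items.map (fun p => (p.1, sjoin p.2)) from rfl, List.map_map]
  refine List.map_congr_left ?_
  intro p hp
  have hvne : p.2 ≠ [] := hne p hp
  have hget : G.get? p.1 = some p.2 := get?_of_mem_of_nodup G.items hndi p hp
  have hgd : G.getD p.1 [] = p.2 := by simp [PySem.Dict.getD, hget]
  have hcd : (mapC G).getD p.1 0 = (p.2.length : Int) := by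
    have hm := get?_mapped (f := fun v : List String => (v.length : Int)) G.items p.1
    simp [PySem.Dict.getD, mapC, hm, hEta, hget]
  simp only [Function.comp, fA, fB, hgd, hcd]
  by_cases h2 : 1 < p.2.length
  · have h2' : (1 : Int) < (p.2.length : Int) := by exact_mod_cast h2
    simp [h2, h2', sjoin_eq_join p.2 hvne]
  · have h2' : ¬ (1 : Int) < (p.2.length : Int) := by exact_mod_cast h2
    have hlen : p.2.length = 1 := by
      cases hv : p.2 with
      | nil => exact absurd hv hvne
      | cons x xs =>
          rw [hv] at h2
          simp at h2 ⊢
          omega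
    obtain ⟨x, hx⟩ := List.length_eq_one_iff.mp hlen
    simp [hx, sjoin, PySem.List.pyGetD, PySem.List.pyGet?, PySem.List.pyIdx?]

-- A's enumerate/index loop is the zip loop, given enough labels
theorem enum_to_zip (full : List String) (pattern : List Int) :
    ∀ (s : Nat) (d : PySem.Dict Int (List String)), s + pattern.length ≤ full.length →
      (PySem.List.enumerate pattern (s : Int)).foldl
        (fun d p => d.insert p.2 (d.getD p.2 [] ++ [PySem.List.pyGetD full p.1 ""])) d
      = (pattern.zip (full.drop s)).foldl astep d := by
  induction pattern with
  | nil => intro s d _; rfl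
  | cons v vs ih =>
      intro s d hs
      have hslt : s < full.length := by simp at hs; omega
      rw [PySem.List.enumerate_cons, List.drop_eq_getElem_cons hslt]
      simp only [List.zip_cons_cons, List.foldl_cons]
      have hget : PySem.List.pyGetD full (s : Int) "" = full[s] := by
        rw [PySem.List.pyGetD_natCast, List.getD_eq_getElem _ _ hslt]
      have hcast : ((s : Int) + 1) = ((s + 1 : Nat) : Int) := by push_cast; ring
      rw [hget, hcast, ih (s + 1) _ (by simp at hs ⊢; omega)]
      rfl

theorem main_equiv (labels : List String) (pattern_labels : List Int)
    (hpre : pattern_labels.length ≤ labels.length) :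
    labels_to_grouped_labels labels pattern_labels
      = labels_to_grouped_labels_alt labels pattern_labels := by
  have hz : (PySem.List.enumerate pattern_labels 0).foldl
      (fun d p => d.insert p.2 (d.getD p.2 [] ++ [PySem.List.pyGetD labels p.1 ""]))
      PySem.Dict.empty
      = (pattern_labels.zip labels).foldl astep PySem.Dict.empty := by
    have h := enum_to_zip labels pattern_labels 0 PySem.Dict.empty (by simpa using hpre)
    simpa using h
  have hp1 := phase1 (pattern_labels.zip labels) PySem.Dict.empty (by intro p hp; cases hp)
  have hnd : ((pattern_labels.zip labels).foldl astep PySem.Dict.empty).keys.Nodup :=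
    nodup_keys_foldl_astep _ _ (by simp [PySem.Dict.empty, PySem.Dict.keys])
  have hp2 := phase2 _ hnd hp1.2
  have eA : labels_to_grouped_labels labels pattern_labels
      = (fun g : PySem.Dict Int (List String) =>
          (g.keys.foldl (fun out key => out.insert key (fA g key)) PySem.Dict.empty).items)
        ((PySem.List.enumerate pattern_labels 0).foldl
          (fun d p => d.insert p.2 (d.getD p.2 [] ++ [PySem.List.pyGetD labels p.1 ""]))
          PySem.Dict.empty) := rfl
  have eB : labels_to_grouped_labels_alt labels pattern_labels
      = (fun st : PySem.Dict Int String × PySem.Dict Int Int =>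
          (st.1.items.foldl (fun out q => out.insert q.1 (fB st.2 q)) PySem.Dict.empty).items)
        ((pattern_labels.zip labels).foldl bstep (PySem.Dict.empty, PySem.Dict.empty)) := rfl
  rw [eA, hz, eB]
  have hfold : (pattern_labels.zip labels).foldl bstep (PySem.Dict.empty, PySem.Dict.empty)
      = (mapJ ((pattern_labels.zip labels).foldl astep PySem.Dict.empty),
         mapC ((pattern_labels.zip labels).foldl astep PySem.Dict.empty)) := hp1.1
  rw [hfold]
  exact hp2

-- ===== VERDICT (by name: the statement is the Claim_ definition above) =====
theorem labels_to_grouped_labels_spec : Claim_equal_labels_to_grouped_labels := by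
  intro labels pattern_labels _ hpre
  unfold Spec_labels_to_grouped_labels
  exact main_equiv labels pattern_labels hpre
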